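-- pv_equiv track=rewrite | github.com/Konubinix/Devel | python/konixls.py | compute_expected_values
-- ===== SOURCE A (Python) =====
-- def base26_to_decimal(value):
--     if len(value) == 1:
--         return ord(value.lower()) - ord("a") + 1
--     else:
--         return base26_to_decimal(value[-1]) \
--             + 26 * base26_to_decimal(value[:-1])
--
-- def fix_indices(rows, cols):
--   if type(rows) == int:
--     rows = (rows, rows)
--   if type(cols) == str:
--     cols = (cols, cols)
--   rows = (
--     rows[0] - 1,
--     rows[1],
--   )
--   cols = (
--       base26_to_decimal(cols[0]) - 1,
--       base26_to_decimal(cols[1]),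
--   )
--   return (rows, cols)
--
-- def compute_expected_values(rows, cols, expected_values):
--   expected_values_lines = [value.rstrip('\n') for value in
--                            expected_values.splitlines()]
--   _, fixed_cols = fix_indices(rows, cols)
--   number_of_cols = fixed_cols[1] - fixed_cols[0]
--
--   def adjust_cols(list_, number_of_cols):
--       return list_ + [''] * (number_of_cols - len(list_))
--
--   for expected_row in expected_values_lines:
--     for expected_col in adjust_cols(expected_row.split("\t"), number_of_cols):
--       yield expected_col
-- ===== SOURCE B (Python) =====
-- def compute_expected_values(rows, cols, expected_values):
--     if type(cols) == str:
--         cols = (cols, cols)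
--
--     def b26(s):
--         n = 0
--         for ch in s:
--             n = n * 26 + (ord(ch.lower()) - ord("a") + 1)
--         return n
--
--     number_of_cols = b26(cols[1]) - b26(cols[0]) + 1
--     for line in expected_values.splitlines():
--         cells = line.split("\t")
--         yield from cells + [''] * (number_of_cols - len(cells))
-- ===== Notes on version B (the rewrite author's own statement) =====
-- stated objective: simpler
-- what changed: base26_to_decimal's suffix recursion (which slices value[:-1] at every step) is replaced by an iterative left-to-right Horner fold, the fix_indices detour is dropped in favour of computing the column count directly, the no-op rstrip('\n') pass after splitlines is removed, and the two nested yield loops become one flat 'yield from' of the padded row.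
import Mathlib
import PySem

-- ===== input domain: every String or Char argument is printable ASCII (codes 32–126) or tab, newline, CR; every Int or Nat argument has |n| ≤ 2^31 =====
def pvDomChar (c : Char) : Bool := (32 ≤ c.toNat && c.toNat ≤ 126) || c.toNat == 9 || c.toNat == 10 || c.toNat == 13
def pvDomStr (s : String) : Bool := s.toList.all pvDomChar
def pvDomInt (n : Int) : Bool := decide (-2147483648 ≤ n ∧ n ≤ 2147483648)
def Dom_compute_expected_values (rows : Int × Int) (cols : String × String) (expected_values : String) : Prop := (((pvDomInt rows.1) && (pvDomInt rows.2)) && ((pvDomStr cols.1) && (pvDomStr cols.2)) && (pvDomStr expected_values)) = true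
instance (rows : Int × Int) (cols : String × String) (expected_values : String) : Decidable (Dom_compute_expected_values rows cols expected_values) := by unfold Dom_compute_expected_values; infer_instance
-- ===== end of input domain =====

-- ===== PORT A =====
-- B simplifies A: Horner fold instead of base26 recursion, no fix_indices detour,
-- the no-op rstrip('\n') dropped, one flat pass instead of two nested yield loops.

-- str.rstrip('\n'), ported by hand on List Char (exact: drops trailing '\n' characters)
def pvRstripNL (cs : List Char) : List Char :=
  (cs.reverse.dropWhile (fun c => c == '\n')).reverse

-- base26_to_decimal; none = the IndexError value[-1] raises on the empty string
def pvB26A : List Char → Option Int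
  | [] => none
  | [c] => some (((PySem.Chars.lowerChar c).toNat : Int) - 97 + 1)
  | c :: d :: rest => do
      let x ← pvB26A [(c :: d :: rest).getLast (by simp)]
      let y ← pvB26A (c :: d :: rest).dropLast
      pure (x + 26 * y)
termination_by cs => cs.length
decreasing_by all_goals simp

-- fix_indices (rows/cols arrive as pairs, so the type-normalising branches do not fire)
def pvFixIndices (rows : Int × Int) (cols : String × String) :
    (Int × Int) × Option (Int × Int) :=
  ((rows.1 - 1, rows.2),
   match pvB26A cols.1.toList, pvB26A cols.2.toList with
   | some a, some b => some (a - 1, b)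
   | _, _ => none)

def pvAdjustCols (list_ : List (List Char)) (number_of_cols : Int) : List (List Char) :=
  list_ ++ List.replicate (number_of_cols - list_.length).toNat []

def compute_expected_values (rows : Int × Int) (cols : String × String) (expected_values : String) : List String :=
  let expected_values_lines := (PySem.Chars.splitlines expected_values.toList).map pvRstripNL
  match (pvFixIndices rows cols).2 with
  | none => []   -- base26_to_decimal raised IndexError (empty column name); excluded by Pre_
  | some fixed_cols =>
    let number_of_cols := fixed_cols.2 - fixed_cols.1
    expected_values_lines.foldl (fun acc expected_row =>
      (pvAdjustCols (PySem.Chars.splitOn expected_row ['\t']) number_of_cols).foldl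
        (fun acc expected_col => acc ++ [String.ofList expected_col]) acc) []

-- ===== PORT B =====
-- b26: iterative Horner accumulation
def pvHorner (cs : List Char) : Int :=
  cs.foldl (fun n ch => n * 26 + (((PySem.Chars.lowerChar ch).toNat : Int) - 97 + 1)) 0

def compute_expected_values_alt (rows : Int × Int) (cols : String × String) (expected_values : String) : List String :=
  let number_of_cols : Int := pvHorner cols.2.toList - pvHorner cols.1.toList + 1
  (PySem.Chars.splitlines expected_values.toList).flatMap (fun line =>
    let cells := PySem.Chars.splitOn line ['\t']
    (cells ++ List.replicate (number_of_cols - cells.length).toNat []).map String.ofList)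

-- ===== PRECONDITION & SPEC =====
-- Pre_ excludes exactly the inputs where A raises: an empty column name makes
-- base26_to_decimal evaluate ''[-1] (IndexError), and a line whose padding multiplier
-- number_of_cols - len(cells) does not fit a machine ssize_t makes [''] * (…) raise OverflowError.
def Pre_compute_expected_values (rows : Int × Int) (cols : String × String) (expected_values : String) : Prop :=
  cols.1 ≠ "" ∧ cols.2 ≠ "" ∧
    ∀ line ∈ PySem.Chars.splitlines expected_values.toList,
      (-9223372036854775808 ≤ pvHorner cols.2.toList - pvHorner cols.1.toList + 1
          - ((PySem.Chars.splitOn line ['\t']).length : Int)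
        ∧ pvHorner cols.2.toList - pvHorner cols.1.toList + 1
          - ((PySem.Chars.splitOn line ['\t']).length : Int) ≤ 9223372036854775807)
instance (rows : Int × Int) (cols : String × String) (expected_values : String) : Decidable (Pre_compute_expected_values rows cols expected_values) := by unfold Pre_compute_expected_values; infer_instance

def pvWitness_compute_expected_values : (Int × Int) × (String × String) × String :=
  ((1, 2), ("a", "c"), "x\ty\nz")

def Spec_compute_expected_values (rows : Int × Int) (cols : String × String) (expected_values : String) (out : List String) : Prop := out = compute_expected_values_alt rows cols expected_values
instance (rows : Int × Int) (cols : String × String) (expected_values : String) (out : List String) : Decidable (Spec_compute_expected_values rows cols expected_values out) := by unfold Spec_compute_expected_values; infer_instance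

-- ===== CLAIM (what is proved, stated in full; the proofs are below) =====
def Claim_equal_compute_expected_values : Prop := ∀ (rows : Int × Int) (cols : String × String) (expected_values : String), Dom_compute_expected_values rows cols expected_values → Pre_compute_expected_values rows cols expected_values → Spec_compute_expected_values rows cols expected_values (compute_expected_values rows cols expected_values)


-- ===== LEMMAS AND PROOFS =====

lemma pvB26A_eq_horner : ∀ (cs : List Char), cs ≠ [] → pvB26A cs = some (pvHorner cs) := by
  intro cs
  induction cs using pvB26A.induct with
  | case1 => intro h; exact absurd rfl h
  | case2 c => intro _; simp [pvB26A, pvHorner]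
  | case3 c d rest ih1 ih2 =>
    intro _
    rw [pvB26A]
    rw [ih1 (by simp), ih2 (by simp)]
    have hd : (c :: d :: rest).dropLast ++ [(c :: d :: rest).getLast (by simp)] = c :: d :: rest :=
      List.dropLast_append_getLast (by simp)
    have := congrArg pvHorner hd
    rw [pvHorner, List.foldl_append] at this
    rw [← this]
    simp only [Option.bind_eq_bind, Option.bind_some, pure, Option.some.injEq]
    simp only [pvHorner, List.foldl_cons, List.foldl_nil]
    ring

lemma splitlines_go_no_nl (isB : Char → Bool) (hB : isB '\n' = true) :
    ∀ (s cur : List Char) (acc : List (List Char)), '\n' ∉ cur → (∀ l ∈ acc, '\n' ∉ l) →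
      ∀ l ∈ PySem.Chars.splitlines.go isB s cur acc, '\n' ∉ l := by
  intro s cur acc
  induction s, cur, acc using PySem.Chars.splitlines.go.induct (isB := isB) with
  | case1 cur acc hemp =>
    intro hcur hacc l hl
    rw [PySem.Chars.splitlines.go, if_pos hemp] at hl
    exact hacc l (List.mem_reverse.mp hl)
  | case2 cur acc hemp =>
    intro hcur hacc l hl
    rw [PySem.Chars.splitlines.go, if_neg hemp] at hl
    rcases List.mem_cons.mp (List.mem_reverse.mp hl) with h | h
    · subst h; simpa using hcur
    · exact hacc _ h
  | case3 rest cur acc ih =>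
    intro hcur hacc l hl
    have hacc' : ∀ l' ∈ cur.reverse :: acc, '\n' ∉ l' := by
      intro l' hl'
      rcases List.mem_cons.mp hl' with h | h
      · subst h; simpa using hcur
      · exact hacc _ h
    rw [PySem.Chars.splitlines.go] at hl
    exact ih (by simp) hacc' l hl
  | case4 c rest cur acc hne hc ih =>
    intro hcur hacc l hl
    have hacc' : ∀ l' ∈ cur.reverse :: acc, '\n' ∉ l' := by
      intro l' hl'
      rcases List.mem_cons.mp hl' with h | h
      · subst h; simpa using hcur
      · exact hacc _ h
    rw [PySem.Chars.splitlines.go] at hl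
    split at hl
    all_goals first
      | exact hne
      | exact ih (by simp) hacc' l hl
  | case5 c rest cur acc hne hc ih =>
    intro hcur hacc l hl
    have hcur' : '\n' ∉ c :: cur := by
      intro hm
      rcases List.mem_cons.mp hm with h | h
      · exact hc (h ▸ hB)
      · exact hcur h
    rw [PySem.Chars.splitlines.go] at hl
    split at hl
    all_goals first
      | exact hne
      | exact absurd ‹isB c = true› hc
      | exact ih hcur' hacc l hl
lemma splitlines_no_nl (s : List Char) : ∀ l ∈ PySem.Chars.splitlines s, '\n' ∉ l := by
  rw [PySem.Chars.splitlines]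
  exact splitlines_go_no_nl _ (by decide) s [] [] (by simp) (by simp)

lemma pvRstripNL_id (l : List Char) (h : '\n' ∉ l) : pvRstripNL l = l := by
  unfold pvRstripNL
  rw [List.dropWhile_eq_self_iff.mpr, List.reverse_reverse]
  intro hne
  simp only [beq_iff_eq]
  intro he
  exact h (by rw [← List.mem_reverse, ← he]; exact List.getElem_mem hne)

-- ===== VERDICT (by name: the statement is the Claim_ definition above) =====
theorem compute_expected_values_spec : Claim_equal_compute_expected_values := by
  intro rows cols ev _dom hpre
  obtain ⟨h1, h2, -⟩ := hpre
  have t1 : cols.1.toList ≠ [] := fun h => h1 (String.toList_eq_nil_iff.mp h)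
  have t2 : cols.2.toList ≠ [] := fun h => h2 (String.toList_eq_nil_iff.mp h)
  unfold Spec_compute_expected_values compute_expected_values compute_expected_values_alt pvFixIndices
  rw [pvB26A_eq_horner _ t1, pvB26A_eq_horner _ t2]
  have hmap : (PySem.Chars.splitlines ev.toList).map pvRstripNL = PySem.Chars.splitlines ev.toList := by
    have : ∀ a ∈ PySem.Chars.splitlines ev.toList, pvRstripNL a = id a := fun a ha =>
      pvRstripNL_id a (splitlines_no_nl ev.toList a ha)
    rw [List.map_congr_left this, List.map_id]
  simp only [hmap, PySem.List.foldl_append_singleton_eq_map, PySem.List.foldl_append_eq_flatMap,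
    List.nil_append, pvAdjustCols]
  have hn : pvHorner cols.2.toList - (pvHorner cols.1.toList - 1)
      = pvHorner cols.2.toList - pvHorner cols.1.toList + 1 := by ring
  rw [hn]
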